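-- pv_equiv track=rewrite | github.com/forthcoming/algorithm | leet_code.py | leet_code_28
-- ===== SOURCE A (Python) =====
-- def leet_code_28(arr):  # 二进制差异数
--     mapping = {}
--     for number in arr:
--         while True:
--             lower_bit = number & -number
--             number -= lower_bit
--             if not number:
--                 if lower_bit in mapping:
--                     mapping[lower_bit] += 1
--                 else:
--                     mapping[lower_bit] = 1
--                 break
--     length = len(arr)
--     total = 0
--     for count in mapping.values():
--         length -= count
--         total += count * length
--     return total
-- ===== SOURCE B (Python) =====
-- def leet_code_28(arr):  # count pairs whose numbers have different highest set bit
--     counts = {}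
--     for n in arr:
--         b = n.bit_length()
--         counts[b] = counts.get(b, 0) + 1
--     length = len(arr)
--     return length * (length - 1) // 2 - sum(c * (c - 1) // 2 for c in counts.values())
-- ===== Notes on version B (the rewrite author's own statement) =====
-- stated objective: simpler
-- what changed: Replaces A's per-element bit-stripping while-loop and running length/total accumulation over dict values by a bit_length frequency dict and complementary pair counting C(n,2) - sum C(c,2).
import Mathlib
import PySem

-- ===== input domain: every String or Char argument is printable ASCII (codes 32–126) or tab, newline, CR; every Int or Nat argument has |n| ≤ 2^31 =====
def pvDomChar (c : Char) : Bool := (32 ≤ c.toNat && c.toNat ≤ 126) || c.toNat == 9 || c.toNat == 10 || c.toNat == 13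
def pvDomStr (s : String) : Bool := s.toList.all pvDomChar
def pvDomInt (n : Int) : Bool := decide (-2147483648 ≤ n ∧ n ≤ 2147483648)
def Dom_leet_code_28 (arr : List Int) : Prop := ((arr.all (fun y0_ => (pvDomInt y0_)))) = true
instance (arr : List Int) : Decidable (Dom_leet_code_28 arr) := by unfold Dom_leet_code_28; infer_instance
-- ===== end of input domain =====

-- B replaces A's bit-stripping while-loop and running pair accumulation by a bit_length frequency
-- dict and complementary counting C(n,2) - Σ C(c,2); objective: simpler.

-- ===== PORT A =====
-- the 'while True' loop of A: strips the lowest set bit until the number is a single bit,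
-- returning that bit (the highest set bit of the original number; 0 for 0).
-- fuel makes the recursion structural; fuel = number.toNat + 1 suffices for number ≥ 0
-- (on negative numbers the Python loop never terminates; Pre_ excludes them).
def pvALoop : Nat → Int → Int
  | 0, _ => 0
  | fuel+1, number =>
    let lower_bit := PySem.Int.band number (-number)
    let number' := number - lower_bit
    if number' = 0 then lower_bit else pvALoop fuel number'

def leet_code_28 (arr : List Int) : Int :=
  let mapping : PySem.Dict Int Int := arr.foldl (fun d number =>
    let key := pvALoop (number.toNat + 1) number
    match d.get? key with
    | some c => d.insert key (c + 1)
    | none => d.insert key 1) PySem.Dict.empty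
  let st := mapping.values.foldl
    (fun (st : Int × Int) count => (st.1 - count, st.2 + count * (st.1 - count)))
    ((arr.length : Int), 0)
  st.2

-- ===== PORT B =====
def leet_code_28_alt (arr : List Int) : Int :=
  let counts : PySem.Dict Int Int := arr.foldl (fun d n =>
    let b : Int := (PySem.Int.bitLength n : Int)
    d.insert b (d.getD b 0 + 1)) PySem.Dict.empty
  let length : Int := arr.length
  PySem.Int.floordiv (length * (length - 1)) 2
    - (counts.values.map (fun c => PySem.Int.floordiv (c * (c - 1)) 2)).sum

-- ===== PRECONDITION & SPEC =====
-- Pre_ excludes lists containing a negative number: there A's 'while True' loop never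
-- terminates (number & -number is positive, so number stays negative forever), so A
-- returns on exactly the inputs Pre_ admits.
def Pre_leet_code_28 (arr : List Int) : Prop := ∀ x ∈ arr, 0 ≤ x
instance (arr : List Int) : Decidable (Pre_leet_code_28 arr) := by
  unfold Pre_leet_code_28; infer_instance

def pvWitness_leet_code_28 : List Int := [0, 1, 5, 7, 12]

def Spec_leet_code_28 (arr : List Int) (out : Int) : Prop := out = leet_code_28_alt arr
instance (arr : List Int) (out : Int) : Decidable (Spec_leet_code_28 arr out) := by
  unfold Spec_leet_code_28; infer_instance

-- ===== CLAIM (what is proved, stated in full; the proofs are below) =====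
def Claim_equal_leet_code_28 : Prop := ∀ (arr : List Int), Dom_leet_code_28 arr →
  Pre_leet_code_28 arr → Spec_leet_code_28 arr (leet_code_28 arr)

-- ===== LEMMAS AND PROOFS =====

-- the key map of B composed back to A's key: A's loop returns 2 ^ bitLength / 2
def pvG (b : Int) : Int := ((2 ^ b.toNat / 2 : Nat) : Int)

lemma pv_bl_lt (m : Nat) : m < 2 ^ PySem.Int.bitLength (m : Int) := by
  have h := PySem.Int.lt_two_pow_bitLength (m : Int)
  simpa using h

lemma pv_bl_le (m : Nat) (h : m ≠ 0) : 2 ^ (PySem.Int.bitLength (m : Int) - 1) ≤ m := by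
  have h2 := PySem.Int.two_pow_bitLength_le (m : Int) (by exact_mod_cast h)
  simpa using h2

lemma pv_bl_pos (m : Nat) (h : m ≠ 0) : 1 ≤ PySem.Int.bitLength (m : Int) := by
  by_contra hc
  push Not at hc
  have h0 : PySem.Int.bitLength (m : Int) = 0 := by omega
  have h1 := pv_bl_lt m
  rw [h0] at h1
  simp at h1
  omega

lemma pv_bl_unique (m k : Nat) (h1 : 2 ^ k ≤ m) (h2 : m < 2 ^ (k + 1)) :
    PySem.Int.bitLength (m : Int) = k + 1 := by
  have hm0 : m ≠ 0 := by have := Nat.one_le_two_pow (n := k); omega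
  have hb := pv_bl_pos m hm0
  have hle := pv_bl_le m hm0
  have hlt := pv_bl_lt m
  have h3 : PySem.Int.bitLength (m : Int) - 1 < k + 1 :=
    (Nat.pow_lt_pow_iff_right (by norm_num)).mp (lt_of_le_of_lt hle h2)
  have h4 : k < PySem.Int.bitLength (m : Int) :=
    (Nat.pow_lt_pow_iff_right (by norm_num)).mp (lt_of_le_of_lt h1 hlt)
  omega

lemma pv_and_pred (m : Nat) (hm : 0 < m) :
    (m &&& (m - 1) = 0 ∧ m = 2 ^ (PySem.Int.bitLength (m : Int) - 1)) ∨
    (0 < m &&& (m - 1) ∧ m &&& (m - 1) < m ∧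
      PySem.Int.bitLength ((m &&& (m - 1) : Nat) : Int) = PySem.Int.bitLength (m : Int)) := by
  have hm0 : m ≠ 0 := by omega
  have hb := pv_bl_pos m hm0
  have hle := pv_bl_le m hm0
  have hlt := pv_bl_lt m
  set b := PySem.Int.bitLength (m : Int) with hbdef
  have hbk : b = (b - 1) + 1 := by omega
  by_cases hpow : m = 2 ^ (b - 1)
  · left
    refine ⟨?_, hpow⟩
    rw [hpow]
    apply Nat.eq_of_testBit_eq
    intro i
    simp
  · right
    have hgt : 2 ^ (b - 1) < m := lt_of_le_of_ne hle (fun h => hpow h.symm)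
    have h2b : (2 : Nat) ^ b = 2 ^ (b - 1) * 2 := by
      conv_lhs => rw [hbk]
      rw [pow_succ]
    have h2b' : (2 : Nat) ^ ((b - 1) + 1) = 2 ^ b := by rw [← hbk]
    have hpos : 0 < 2 ^ (b - 1) := Nat.two_pow_pos _
    have hdm : m / 2 ^ (b - 1) = 1 := by
      apply Nat.div_eq_of_lt_le <;> omega
    have hdm1 : (m - 1) / 2 ^ (b - 1) = 1 := by
      apply Nat.div_eq_of_lt_le <;> omega
    have htm : Nat.testBit m (b - 1) = true := by
      rw [Nat.testBit_eq_decide_div_mod_eq, hdm]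
      decide
    have htm1 : Nat.testBit (m - 1) (b - 1) = true := by
      rw [Nat.testBit_eq_decide_div_mod_eq, hdm1]
      decide
    have ht : Nat.testBit (m &&& (m - 1)) (b - 1) = true := by
      rw [Nat.testBit_and, htm, htm1]
      rfl
    have hge : 2 ^ (b - 1) ≤ m &&& (m - 1) := Nat.ge_two_pow_of_testBit ht
    have hler : m &&& (m - 1) ≤ m - 1 := Nat.and_le_right
    refine ⟨by omega, by omega, ?_⟩
    have := pv_bl_unique (m &&& (m - 1)) (b - 1) hge (by omega)
    omega

lemma pvALoop_eq (fuel m : Nat) (hf : m < fuel) :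
    pvALoop fuel (m : Int) = ((2 ^ PySem.Int.bitLength (m : Int) / 2 : Nat) : Int) := by
  induction fuel generalizing m with
  | zero => omega
  | succ fuel ih =>
    rcases Nat.eq_zero_or_pos m with h0 | hm
    · subst h0
      simp [pvALoop, PySem.Int.band]
    · have hm0 : m ≠ 0 := by omega
      have hband : PySem.Int.band (m : Int) (-(m : Int)) = ((m - (m &&& (m - 1)) : Nat) : Int) := by
        rw [PySem.Int.band]
        rw [if_pos (by positivity), if_neg (by omega)]
        have e1 : ((m : Int)).toNat = m := by omega
        have e2 : (-(-(m : Int)) - 1).toNat = m - 1 := by omega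
        rw [e1, e2]
      have htle : m &&& (m - 1) ≤ m - 1 := Nat.and_le_right
      simp only [pvALoop, hband]
      have hnum : (m : Int) - ((m - (m &&& (m - 1)) : Nat) : Int) = ((m &&& (m - 1) : Nat) : Int) := by
        omega
      rw [hnum]
      rcases pv_and_pred m hm with ⟨hz, hpow⟩ | ⟨hpos, hlt, hbl⟩
      · rw [hz]
        have hb := pv_bl_pos m hm0
        rw [if_pos (by simp)]
        have h2 : 2 ^ PySem.Int.bitLength (m : Int) / 2 = 2 ^ (PySem.Int.bitLength (m : Int) - 1) := by
          conv_lhs => rw [show PySem.Int.bitLength (m : Int) = (PySem.Int.bitLength (m : Int) - 1) + 1 by omega]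
          rw [pow_succ, Nat.mul_div_cancel _ (by norm_num)]
        rw [h2, ← hpow]
        simp
      · rw [if_neg (by exact_mod_cast Nat.pos_iff_ne_zero.mp hpos)]
        rw [ih _ (by omega), hbl]

lemma pv_half_pow_strictMono : StrictMono (fun b : Nat => 2 ^ b / 2) := by
  apply strictMono_nat_of_lt_succ
  intro b
  have h1 : (2 : Nat) ^ (b + 1) / 2 = 2 ^ b := by
    rw [pow_succ, Nat.mul_div_cancel _ (by norm_num)]
  simp only [h1]
  exact Nat.div_lt_self (Nat.two_pow_pos b) (by norm_num)

-- rewrite A's dict-building loop as a counter over the mapped key list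
lemma pv_dictA (arr : List Int) :
    (arr.foldl (fun d number =>
      let key := pvALoop (number.toNat + 1) number
      match d.get? key with
      | some c => d.insert key (c + 1)
      | none => d.insert key 1) (PySem.Dict.empty : PySem.Dict Int Int))
    = PySem.Dict.counter (arr.map (fun n => pvALoop (n.toNat + 1) n)) := by
  rw [← PySem.Dict.foldl_insert_getD_add_one_eq_counter, List.foldl_map]
  have hstep : (fun (d : PySem.Dict Int Int) (number : Int) =>
      let key := pvALoop (number.toNat + 1) number
      match d.get? key with
      | some c => d.insert key (c + 1)
      | none => d.insert key 1)
    = fun (d : PySem.Dict Int Int) (number : Int) =>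
        d.insert (pvALoop (number.toNat + 1) number)
          (d.getD (pvALoop (number.toNat + 1) number) 0 + 1) := by
    funext d number
    cases h : d.get? (pvALoop (number.toNat + 1) number) with
    | some c => simp [h, PySem.Dict.getD_of_get?_eq_some d 0 h]
    | none => simp [h, PySem.Dict.getD_of_get?_eq_none d 0 h]
  rw [hstep]

lemma pv_dictB (arr : List Int) :
    (arr.foldl (fun d n =>
      let b : Int := (PySem.Int.bitLength n : Int)
      d.insert b (d.getD b 0 + 1)) (PySem.Dict.empty : PySem.Dict Int Int))
    = PySem.Dict.counter (arr.map (fun n => (PySem.Int.bitLength n : Int))) := by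
  rw [← PySem.Dict.foldl_insert_getD_add_one_eq_counter, List.foldl_map]

lemma pv_ofList_map_aux (g : Int → Int) (l : List Int) (s : PySem.Set Int)
    (hinj : ∀ x, (x ∈ s ∨ x ∈ l) → ∀ y, (y ∈ s ∨ y ∈ l) → g x = g y → x = y) :
    List.foldl PySem.Set.add (s.map g) (l.map g) = (List.foldl PySem.Set.add s l).map g := by
  induction l generalizing s with
  | nil => simp
  | cons x l ih =>
    simp only [List.map_cons, List.foldl_cons]
    have hadd : PySem.Set.add (s.map g) (g x) = (PySem.Set.add s x).map g := by
      simp only [PySem.Set.add]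
      have hc : PySem.Set.contains (List.map g s) (g x) = PySem.Set.contains s x := by
        simp only [PySem.Set.contains]
        by_cases hx : x ∈ s
        · simp [hx]
          exact ⟨x, hx, rfl⟩
        · have h2 : g x ∉ List.map g s := by
            intro hmem
            rcases List.mem_map.mp hmem with ⟨y, hy, hgy⟩
            exact hx (hinj y (Or.inl hy) x (Or.inr (List.mem_cons_self)) hgy ▸ hy)
          simp [hx, h2]
      rw [hc]
      split_ifs with h
      · rfl
      · simp
    rw [hadd]
    apply ih
    intro a ha b hb hab
    apply hinj a ?_ b ?_ hab
    · rcases ha with ha | ha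
      · rcases (PySem.Set.mem_add _ _ _).mp ha with h | h
        · exact Or.inl h
        · exact Or.inr (by simp [h])
      · exact Or.inr (by simp [ha])
    · rcases hb with hb | hb
      · rcases (PySem.Set.mem_add _ _ _).mp hb with h | h
        · exact Or.inl h
        · exact Or.inr (by simp [h])
      · exact Or.inr (by simp [hb])

lemma pv_count_map (g : Int → Int) (l : List Int) (x : Int)
    (hinj : ∀ y ∈ l, g y = g x → y = x) :
    List.count (g x) (l.map g) = l.count x := by
  induction l with
  | nil => simp
  | cons y l ih =>
    simp only [List.map_cons, List.count_cons]
    rw [ih (fun z hz => hinj z (List.mem_cons_of_mem _ hz))]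
    by_cases hyx : y = x
    · simp [hyx]
    · have hg : g y ≠ g x := fun h => hyx (hinj y List.mem_cons_self h)
      simp [hyx, hg]

lemma pv_values_counter (l : List Int) :
    (PySem.Dict.counter l).values
      = (PySem.Set.ofList l).map (fun k => ((List.count k l : Nat) : Int)) := by
  simp only [PySem.Dict.values, PySem.Dict.items_counter, List.map_map]
  rfl

lemma pv_counter_map_values (g : Int → Int) (l : List Int)
    (hinj : ∀ x ∈ l, ∀ y ∈ l, g x = g y → x = y) :
    (PySem.Dict.counter (l.map g)).values = (PySem.Dict.counter l).values := by
  rw [pv_values_counter, pv_values_counter]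
  have hset : PySem.Set.ofList (l.map g) = (PySem.Set.ofList l).map g := by
    have h := pv_ofList_map_aux g l PySem.Set.empty (by
      intro a ha b hb hab
      have ha' : a ∈ l := by
        rcases ha with h | h
        · simp [PySem.Set.empty] at h
        · exact h
      have hb' : b ∈ l := by
        rcases hb with h | h
        · simp [PySem.Set.empty] at h
        · exact h
      exact hinj a ha' b hb' hab)
    simpa [PySem.Set.ofList, PySem.Set.empty] using h
  rw [hset, List.map_map]
  apply List.map_congr_left
  intro k hk
  have hk' : k ∈ l := (PySem.Set.mem_ofList l k).mp hk
  have hcnt := pv_count_map g l k (fun y hy h => hinj y hy k hk' h)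
  simp only [Function.comp_apply, hcnt]

lemma pv_values_sum (l : List Int) :
    (PySem.Dict.counter l).values.sum = (l.length : Int) := by
  rw [pv_values_counter]
  have hperm : (PySem.Set.ofList l).Perm l.dedup := by
    rw [List.perm_ext_iff_of_nodup (PySem.Set.nodup_ofList l) l.nodup_dedup]
    intro a
    rw [PySem.Set.mem_ofList, List.mem_dedup]
  rw [(hperm.map _).sum_eq]
  have hcast : (l.dedup.map (fun k => ((List.count k l : Nat) : Int)))
      = (l.dedup.map (fun k => List.count k l)).map (fun n : Nat => (n : Int)) := by
    rw [List.map_map]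
    rfl
  rw [hcast, ← Nat.cast_list_sum, List.sum_map_count_dedup_eq_length]

lemma pv_fold_double (cs : List Int) (s t : Int) :
    2 * (cs.foldl (fun st c => (st.1 - c, st.2 + c * (st.1 - c))) (s, t)).2
      = 2 * t + cs.sum * (2 * s - cs.sum) - (cs.map (fun c => c * c)).sum := by
  induction cs generalizing s t with
  | nil => simp
  | cons c cs ih =>
    simp only [List.foldl_cons, List.sum_cons, List.map_cons]
    rw [ih]
    ring

lemma pv_even_half (c : Int) : 2 * (c * (c - 1) / 2) = c * (c - 1) := by
  apply Int.mul_ediv_cancel'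
  have h := Int.even_mul_succ_self (c - 1)
  simp only [sub_add_cancel] at h
  rw [mul_comm] at h
  exact h.two_dvd

lemma pv_sum_halves (cs : List Int) :
    2 * (cs.map (fun c => c * (c - 1) / 2)).sum = (cs.map (fun c => c * (c - 1))).sum := by
  induction cs with
  | nil => simp
  | cons c cs ih =>
    simp only [List.map_cons, List.sum_cons, mul_add]
    rw [ih, pv_even_half]

lemma pv_sum_split (cs : List Int) :
    (cs.map (fun c => c * (c - 1))).sum = (cs.map (fun c => c * c)).sum - cs.sum := by
  induction cs with
  | nil => simp
  | cons c cs ih =>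
    simp only [List.map_cons, List.sum_cons]
    rw [ih]
    ring

lemma pv_fold_total (cs : List Int) (L : Int) (hs : cs.sum = L) :
    (cs.foldl (fun st c => (st.1 - c, st.2 + c * (st.1 - c))) (L, 0)).2
      = PySem.Int.floordiv (L * (L - 1)) 2
        - (cs.map (fun c => PySem.Int.floordiv (c * (c - 1)) 2)).sum := by
  have hmap : cs.map (fun c => PySem.Int.floordiv (c * (c - 1)) 2)
      = cs.map (fun c => c * (c - 1) / 2) := by
    apply List.map_congr_left
    intro c _
    exact PySem.Int.floordiv_eq_ediv_of_pos (by norm_num)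
  rw [hmap, PySem.Int.floordiv_eq_ediv_of_pos (by norm_num)]
  have hdouble := pv_fold_double cs L 0
  rw [hs] at hdouble
  have hL := pv_even_half L
  have hsum2 := pv_sum_halves cs
  have hsplit := pv_sum_split cs
  have hsq : L * (2 * L - L) = L * L := by ring
  have hLL : L * (L - 1) = L * L - L := by ring
  rw [hs] at hsplit
  linarith

-- ===== VERDICT (by name: the statement is the Claim_ definition above) =====
theorem leet_code_28_spec : Claim_equal_leet_code_28 := by
  intro arr _ hpre
  unfold Spec_leet_code_28
  show leet_code_28 arr = leet_code_28_alt arr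
  unfold leet_code_28 leet_code_28_alt
  simp only []
  rw [pv_dictA, pv_dictB]
  have hkeys : arr.map (fun n => pvALoop (n.toNat + 1) n)
      = (arr.map (fun n => (PySem.Int.bitLength n : Int))).map pvG := by
    rw [List.map_map]
    apply List.map_congr_left
    intro x hx
    have hx0 : 0 ≤ x := hpre x hx
    have hx' : x = ((x.toNat : Nat) : Int) := (Int.toNat_of_nonneg hx0).symm
    calc pvALoop (x.toNat + 1) x
        = pvALoop (x.toNat + 1) ((x.toNat : Nat) : Int) := by rw [← hx']
      _ = ((2 ^ PySem.Int.bitLength ((x.toNat : Nat) : Int) / 2 : Nat) : Int) :=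
          pvALoop_eq _ _ (Nat.lt_succ_self _)
      _ = (pvG ∘ fun n => (PySem.Int.bitLength n : Int)) x := by
          rw [← hx']
          simp [pvG]
  rw [hkeys]
  rw [pv_counter_map_values pvG _ (by
    intro a ha b hb hab
    rcases List.mem_map.mp ha with ⟨x, _, hxa⟩
    rcases List.mem_map.mp hb with ⟨y, _, hyb⟩
    subst hxa hyb
    have : (2 : Nat) ^ (PySem.Int.bitLength x) / 2 = 2 ^ (PySem.Int.bitLength y) / 2 := by
      have := hab
      simp only [pvG, Int.toNat_natCast] at this
      exact_mod_cast this
    have := pv_half_pow_strictMono.injective this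
    exact_mod_cast congrArg (fun n : Nat => (n : Int)) this)]
  apply pv_fold_total
  rw [pv_values_sum]
  simp
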